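-- pv_equiv track=rewrite | github.com/ck2w/baruch-mfe-lab | MTH9900/code/structure.py | path_from_index
-- ===== SOURCE A (Python) =====
-- def path_from_index(index):
--     n = 0
--     base = 0
--     while True:
--         n += 1
--         next_base = (4**n-1)//3
--         if next_base > index: break
--         base = next_base
--     n = n-1
--     sub = index - base
--     path = []
--     while len(path) < n:
--         i = sub % 4
--         path.append(i)
--         sub = sub // 4
--     return path[::-1]
-- ===== SOURCE B (Python) =====
-- def path_from_index(index):
--     digits = []
--     while index > 0:
--         index -= 1
--         digits.append(index % 4)
--         index //= 4
--     return digits[::-1]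
-- ===== Notes on version B (the rewrite author's own statement) =====
-- stated objective: simpler
-- what changed: Replaces A's two-phase scheme (loop over cumulative level sizes (4^n-1)/3 to find the path length, then a fixed-length digit-extraction loop plus reversal) with a single bijective-base-4 conversion loop: while index > 0, decrement, take %4, then //4, and reverse the digits once at the end.
import Mathlib
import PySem

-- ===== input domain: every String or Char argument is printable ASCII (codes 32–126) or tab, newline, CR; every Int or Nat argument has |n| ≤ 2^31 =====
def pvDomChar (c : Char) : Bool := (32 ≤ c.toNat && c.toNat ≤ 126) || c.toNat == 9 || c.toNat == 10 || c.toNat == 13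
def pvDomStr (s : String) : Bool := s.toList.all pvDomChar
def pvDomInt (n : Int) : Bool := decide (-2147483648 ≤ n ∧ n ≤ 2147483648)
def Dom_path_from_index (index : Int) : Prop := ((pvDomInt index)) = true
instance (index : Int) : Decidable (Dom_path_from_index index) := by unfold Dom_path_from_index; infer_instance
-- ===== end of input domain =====

-- B replaces A's two-phase scheme (level search via (4^n-1)//3, then digit extraction)
-- with a single bijective-base-4 conversion loop; objective: simpler.

-- ===== PORT A =====
-- termination fact for A's first loop: 3*k ≤ 4^k - 1, so (4^k-1)//3 ≥ k grows past index
theorem pfi_pow_ge (k : Nat) : 3 * (k : Int) ≤ 4 ^ k - 1 := by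
  induction k with
  | zero => simp
  | succ n ih =>
      have h1 : (1 : Int) ≤ 4 ^ n := one_le_pow₀ (by norm_num)
      have : (4 : Int) ^ (n + 1) = 4 ^ n * 4 := pow_succ 4 n
      push_cast
      linarith

-- A's 'while True' loop: n += 1; next_base = (4**n-1)//3; if next_base > index: break; base = next_base
def pfiFindN (index : Int) (n : Nat) (base : Int) : Nat × Int :=
  if PySem.Int.floordiv (4 ^ (n + 1) - 1) 3 > index then (n + 1, base)
  else pfiFindN index (n + 1) (PySem.Int.floordiv (4 ^ (n + 1) - 1) 3)
termination_by index.toNat + 1 - n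
decreasing_by
  rename_i h
  have h2 : ((n : Int) + 1) ≤ PySem.Int.floordiv (4 ^ (n + 1) - 1) 3 := by
    rw [PySem.Int.le_floordiv_iff_mul_le (by norm_num)]
    have := pfi_pow_ge (n + 1)
    push_cast at this ⊢
    linarith
  have h3 : ((n : Int) + 1) ≤ index := by omega
  omega

-- A's second loop: while len(path) < n: path.append(sub % 4); sub //= 4
def pfiDigits (sub : Int) (n : Nat) (path : List Int) : List Int :=
  if path.length < n then
    pfiDigits (PySem.Int.floordiv sub 4) n (path ++ [PySem.Int.mod sub 4])
  else path
termination_by n - path.length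
decreasing_by simp; omega

def path_from_index (index : Int) : List Int :=
  let r := pfiFindN index 0 0
  let n := r.1 - 1
  let sub := index - r.2
  (pfiDigits sub n []).reverse   -- path[::-1]

-- ===== PORT B =====
-- B's loop: while index > 0: index -= 1; digits.append(index % 4); index //= 4
def pfiBuild (index : Int) (digits : List Int) : List Int :=
  if index > 0 then
    pfiBuild (PySem.Int.floordiv (index - 1) 4) (digits ++ [PySem.Int.mod (index - 1) 4])
  else digits
termination_by index.toNat
decreasing_by
  rename_i h
  have h2 : PySem.Int.floordiv (index - 1) 4 < index := by
    rw [PySem.Int.floordiv_lt_iff_lt_mul (by norm_num)]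
    omega
  omega

def path_from_index_alt (index : Int) : List Int :=
  (pfiBuild index []).reverse   -- digits[::-1]

-- ===== PRECONDITION & SPEC =====
def Spec_path_from_index (index : Int) (out : List Int) : Prop := out = path_from_index_alt index
instance (index : Int) (out : List Int) : Decidable (Spec_path_from_index index out) := by unfold Spec_path_from_index; infer_instance

-- ===== CLAIM (what is proved, stated in full; the proofs are below) =====
def Claim_equal_path_from_index : Prop := ∀ (index : Int), Dom_path_from_index index → Spec_path_from_index index (path_from_index index)

-- ===== LEMMAS AND PROOFS =====

-- level bases b m = (4^m-1)/3, recursively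
def pfiB : Nat → Int
  | 0 => 0
  | m + 1 => 4 * pfiB m + 1

theorem pfiB_nonneg (m : Nat) : 0 ≤ pfiB m := by
  induction m with
  | zero => simp [pfiB]
  | succ n ih => simp [pfiB]; omega

theorem pfiB_three (m : Nat) : 3 * pfiB m = 4 ^ m - 1 := by
  induction m with
  | zero => simp [pfiB]
  | succ n ih =>
      have : (4 : Int) ^ (n + 1) = 4 ^ n * 4 := pow_succ 4 n
      simp [pfiB]; linarith

theorem pfiB_ge (m : Nat) : (m : Int) ≤ pfiB m := by
  have h1 := pfiB_three m
  have h2 := pfi_pow_ge m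
  omega

theorem pfiB_floordiv (m : Nat) : PySem.Int.floordiv (4 ^ m - 1) 3 = pfiB m := by
  rw [PySem.Int.floordiv_eq_iff_of_pos (by norm_num)]
  have := pfiB_three m
  constructor <;> linarith

theorem pfiB_mono : StrictMono pfiB := by
  apply strictMono_nat_of_lt_succ
  intro n
  have := pfiB_nonneg n
  simp [pfiB]; omega

-- characterisation of the first loop
theorem pfiFindN_spec (f : Nat) : ∀ (index : Int) (n : Nat),
    index.toNat + 1 - n ≤ f → pfiB n ≤ index →
    ∃ m, n ≤ m ∧ pfiFindN index n (pfiB n) = (m + 1, pfiB m) ∧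
      pfiB m ≤ index ∧ index < pfiB (m + 1) := by
  induction f with
  | zero =>
      intro index n hf h
      exfalso
      have h1 := pfiB_ge n
      have h2 := pfiB_nonneg n
      omega
  | succ f ih =>
      intro index n hf h
      rw [pfiFindN, pfiB_floordiv]
      by_cases hc : pfiB (n + 1) > index
      · exact ⟨n, le_refl n, by rw [if_pos hc], h, hc⟩
      · rw [not_lt] at hc
        have hn1 : ((n : Int) + 1) ≤ index := by
          have := pfiB_ge (n + 1); push_cast at this; omega
        have hf' : index.toNat + 1 - (n + 1) ≤ f := by omega
        obtain ⟨m, hm, heq, h3, h4⟩ := ih index (n + 1) hf' hc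
        refine ⟨m, by omega, ?_, h3, h4⟩
        rw [if_neg (by omega), heq]

-- pure version of A's digit loop
def pfiAdig : Int → Nat → List Int
  | _, 0 => []
  | sub, m + 1 => PySem.Int.mod sub 4 :: pfiAdig (PySem.Int.floordiv sub 4) m

theorem pfiDigits_acc (k : Nat) : ∀ (sub : Int) (n : Nat) (path : List Int),
    n - path.length = k → pfiDigits sub n path = path ++ pfiAdig sub k := by
  induction k with
  | zero =>
      intro sub n path hk
      rw [pfiDigits, if_neg (by omega)]
      simp [pfiAdig]
  | succ k ih =>
      intro sub n path hk
      rw [pfiDigits, if_pos (by omega)]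
      rw [ih (PySem.Int.floordiv sub 4) n (path ++ [PySem.Int.mod sub 4]) (by simp; omega)]
      simp [pfiAdig]

-- pure version of B's loop
def pfiBdig (index : Int) : List Int :=
  if index > 0 then
    PySem.Int.mod (index - 1) 4 :: pfiBdig (PySem.Int.floordiv (index - 1) 4)
  else []
termination_by index.toNat
decreasing_by
  rename_i h
  have h2 : PySem.Int.floordiv (index - 1) 4 < index := by
    rw [PySem.Int.floordiv_lt_iff_lt_mul (by norm_num)]
    omega
  omega

theorem pfiBuild_acc (index : Int) (digits : List Int) :
    pfiBuild index digits = digits ++ pfiBdig index := by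
  induction index, digits using pfiBuild.induct with
  | case1 index digits h ih =>
      rw [pfiBuild, if_pos h, ih]
      conv_rhs => rw [pfiBdig, if_pos h]
      simp
  | case2 index digits h =>
      rw [pfiBuild, if_neg h, pfiBdig, if_neg h]
      simp

theorem path_from_index_pos (index : Int) (m : Nat)
    (h1 : pfiB m ≤ index) (h2 : index < pfiB (m + 1)) :
    path_from_index index = (pfiAdig (index - pfiB m) m).reverse := by
  have h0 : pfiB 0 ≤ index := le_trans (pfiB_mono.monotone (Nat.zero_le m)) h1
  obtain ⟨m2, _, heq, h3, h4⟩ := pfiFindN_spec (index.toNat + 1) index 0 (by omega) h0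
  have hm : m2 = m := by
    rcases lt_trichotomy m2 m with hlt | he | hgt
    · exfalso
      have : pfiB (m2 + 1) ≤ pfiB m := pfiB_mono.monotone (by omega)
      omega
    · exact he
    · exfalso
      have : pfiB (m + 1) ≤ pfiB m2 := pfiB_mono.monotone (by omega)
      omega
  rw [hm] at heq h3 h4
  unfold path_from_index
  have h0' : pfiB 0 = 0 := rfl
  rw [← h0', heq]
  simp only [Nat.add_sub_cancel]
  rw [pfiDigits_acc m (index - pfiB m) m [] (by simp)]
  simp

theorem path_from_index_nonpos (index : Int) (h : index ≤ 0) :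
    path_from_index index = [] := by
  unfold path_from_index
  rw [pfiFindN]
  have h1 : PySem.Int.floordiv (4 ^ (0 + 1) - 1) 3 = 1 := by
    have := pfiB_floordiv 1
    simpa [pfiB] using this
  rw [h1, if_pos (by omega)]
  simp only
  rw [pfiDigits, if_neg (by simp)]
  simp

theorem pfi_main : ∀ (N : Nat) (index : Int), index.toNat ≤ N →
    path_from_index index = (pfiBdig index).reverse := by
  intro N
  induction N with
  | zero =>
      intro index h
      have hle : index ≤ 0 := by omega
      rw [path_from_index_nonpos index hle, pfiBdig, if_neg (by omega)]
      rfl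
  | succ N ih =>
      intro index h
      by_cases hpos : index > 0
      · -- find the level of index
        obtain ⟨m, _, _, h3, h4⟩ :=
          pfiFindN_spec (index.toNat + 1) index 0 (by omega) (by simp only [pfiB]; omega)
        -- m ≥ 1 since index ≥ 1 = pfiB 1
        match m, h3, h4 with
        | 0, h3, h4 => exact absurd h4 (by simp [pfiB] at *; omega)
        | m' + 1, h3, h4 =>
          have hq : PySem.Int.floordiv (index - 1) 4 * 4 + PySem.Int.mod (index - 1) 4
              = index - 1 := PySem.Int.floordiv_mul_add_mod (index - 1) 4
          have hr0 : 0 ≤ PySem.Int.mod (index - 1) 4 := PySem.Int.mod_nonneg _ (by norm_num)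
          have hr4 : PySem.Int.mod (index - 1) 4 < 4 := PySem.Int.mod_lt _ (by norm_num)
          have hqs : PySem.Int.floordiv (index - pfiB (m' + 1)) 4 * 4
              + PySem.Int.mod (index - pfiB (m' + 1)) 4
              = index - pfiB (m' + 1) := PySem.Int.floordiv_mul_add_mod _ 4
          have hrs0 : 0 ≤ PySem.Int.mod (index - pfiB (m' + 1)) 4 :=
            PySem.Int.mod_nonneg _ (by norm_num)
          have hrs4 : PySem.Int.mod (index - pfiB (m' + 1)) 4 < 4 :=
            PySem.Int.mod_lt _ (by norm_num)
          have hB : pfiB (m' + 1) = 4 * pfiB m' + 1 := rfl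
          have hB2 : pfiB (m' + 1 + 1) = 4 * pfiB (m' + 1) + 1 := rfl
          have hreq : PySem.Int.mod (index - 1) 4 = PySem.Int.mod (index - pfiB (m' + 1)) 4 ∧
              PySem.Int.floordiv (index - 1) 4
                = PySem.Int.floordiv (index - pfiB (m' + 1)) 4 + pfiB m' := by
            have := pfiB_nonneg m'
            constructor <;> omega
          have hq1 : pfiB m' ≤ PySem.Int.floordiv (index - 1) 4 := by
            have := pfiB_nonneg m'
            omega
          have hq2 : PySem.Int.floordiv (index - 1) 4 < pfiB (m' + 1) := by omega
          have hqlt : (PySem.Int.floordiv (index - 1) 4).toNat ≤ N := by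
            have := pfiB_nonneg m'
            omega
          rw [path_from_index_pos index (m' + 1) h3 h4]
          have hA : pfiAdig (index - pfiB (m' + 1)) (m' + 1)
              = PySem.Int.mod (index - pfiB (m' + 1)) 4 ::
                pfiAdig (PySem.Int.floordiv (index - pfiB (m' + 1)) 4) m' := rfl
          rw [hA, List.reverse_cons]
          have hAq : path_from_index (PySem.Int.floordiv (index - 1) 4)
              = (pfiAdig (PySem.Int.floordiv (index - pfiB (m' + 1)) 4) m').reverse := by
            rw [path_from_index_pos _ m' hq1 hq2]
            congr 2
            omega
          rw [← hAq, ih _ hqlt]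
          conv_rhs => rw [pfiBdig, if_pos hpos]
          rw [List.reverse_cons, hreq.1]
      · rw [not_lt] at hpos
        rw [path_from_index_nonpos index hpos, pfiBdig, if_neg (by omega)]
        rfl

-- ===== VERDICT (by name: the statement is the Claim_ definition above) =====
theorem path_from_index_spec : Claim_equal_path_from_index := by
  intro index _
  unfold Spec_path_from_index path_from_index_alt
  rw [pfiBuild_acc, List.nil_append]
  exact pfi_main index.toNat index (le_refl _)
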